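-- pv_equiv track=rewrite | github.com/mukesh-Guntumadugu/llm_beatmap_generator | onsetdetection/extract_onsets_flamingo.py | is_hallucinated_loop
-- ===== SOURCE A (Python) =====
-- def is_hallucinated_loop(onsets: list[int]) -> bool:
--     if not onsets or len(onsets) < 10:
--         return False
--     if len(onsets) > 150:
--         return True
--     times = onsets
--     deltas = [round(times[j+1] - times[j], 1) for j in range(len(times)-1)]
--     for j in range(len(deltas) - 8):
--         window = deltas[j:j+8]
--         if all(w == window[0] for w in window):
--             return True
--     return False
-- ===== SOURCE B (Python) =====
-- def is_hallucinated_loop(onsets: list[int]) -> bool: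
--     if not onsets or len(onsets) < 10:
--         return False
--     if len(onsets) > 150:
--         return True
--     deltas = [round(onsets[j + 1] - onsets[j], 1) for j in range(len(onsets) - 1)]
--     # single pass: run length of consecutive equal deltas
--     prev = deltas[0]
--     run = 1
--     for d in deltas[1:]:
--         if d == prev:
--             run += 1
--             if run == 8:
--                 return True
--         else:
--             run = 1
--         prev = d
--     return False
-- ===== Notes on version B (the rewrite author's own statement) =====
-- stated objective: simpler
-- what changed: Replaced A's nested scan over all length-8 windows of the delta list by a single pass keeping a run-length counter of consecutive equal deltas.
-- intended difference: On onset lists that pass the length guards and whose only run of 8 equal consecutive deltas ends at the very last delta, A returns False because its window loop range(len(deltas)-8) stops one window short and never inspects the final delta, while B returns True, the intended detection of 8 equal consecutive deltas. — e.g. on is_hallucinated_loop([0, 5, 6, 7, 8, 9, 10, 11, 12, 13]): A returns false, B returns true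
import Mathlib
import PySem

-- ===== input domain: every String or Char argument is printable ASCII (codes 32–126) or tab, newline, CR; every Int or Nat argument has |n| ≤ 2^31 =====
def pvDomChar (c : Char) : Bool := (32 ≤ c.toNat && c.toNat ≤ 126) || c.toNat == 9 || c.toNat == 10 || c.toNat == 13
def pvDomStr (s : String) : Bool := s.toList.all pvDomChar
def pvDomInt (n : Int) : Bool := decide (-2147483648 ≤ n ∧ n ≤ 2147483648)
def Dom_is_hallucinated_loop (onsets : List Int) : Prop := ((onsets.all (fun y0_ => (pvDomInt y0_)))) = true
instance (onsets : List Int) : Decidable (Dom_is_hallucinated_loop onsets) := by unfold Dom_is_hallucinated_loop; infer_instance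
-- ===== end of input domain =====

-- B replaces A's scan over all length-8 windows of the delta list by one single pass
-- with a run-length counter (objective: simpler); A's window loop stops one window short
-- of the last delta, so the two differ exactly on the D_ region stated below.

-- ===== PORT A =====
-- round(x, 1) on an int difference is the identity, so deltas[j] = onsets[j+1] - onsets[j].
-- Indices j and j+1 are always in range (j < len-1), so pyGetD's default is never used.
def is_hallucinated_loop (onsets : List Int) : Bool :=
  if onsets = [] ∨ onsets.length < 10 then false
  else if onsets.length > 150 then true
  else
    let times := onsets
    let deltas := (PySem.List.pyRange 0 ((times.length : Int) - 1) 1).map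
      (fun j => PySem.List.pyGetD times (j + 1) 0 - PySem.List.pyGetD times j 0)
    (PySem.List.pyRange 0 ((deltas.length : Int) - 8) 1).any (fun j =>
      let window := PySem.List.slice deltas (some j) (some (j + 8))
      -- window[0]: window is nonempty for every j in the range
      window.all (fun w => w == PySem.List.pyGetD window 0 0))

-- ===== PORT B =====
-- the loop `for d in deltas[1:]` with state (prev, run); run is a small nonnegative counter
def bScan (prev : Int) (run : Nat) : List Int → Bool
  | [] => false
  | d :: rest =>
    if d == prev then
      if run + 1 == 8 then true else bScan d (run + 1) rest
    else bScan d 1 rest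

def is_hallucinated_loop_alt (onsets : List Int) : Bool :=
  if onsets = [] ∨ onsets.length < 10 then false
  else if onsets.length > 150 then true
  else
    let deltas := (PySem.List.pyRange 0 ((onsets.length : Int) - 1) 1).map
      (fun j => PySem.List.pyGetD onsets (j + 1) 0 - PySem.List.pyGetD onsets j 0)
    -- deltas[0] is in range (len(deltas) = len(onsets) - 1 ≥ 9)
    bScan (PySem.List.pyGetD deltas 0 0) 1 (PySem.List.slice deltas (some 1) none)

-- ===== PRECONDITION & SPEC =====

-- helpers used by D_ (independent of both ports):
-- deltasOf xs : the list of consecutive differences;  hasRun8 l : l has 8 consecutive equal elements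
def deltasOf (xs : List Int) : List Int := xs.tail.zipWith (· - ·) xs
def hasRun8 (l : List Int) : Prop := ∃ a ∈ l, List.replicate 8 a <:+: l

-- On onset lists that pass the length guards and whose only run of 8 equal consecutive
-- deltas ends at the very last delta, A returns False (its window loop
-- range(len(deltas)-8) stops one window short and never inspects the final delta),
-- while B returns True, the intended detection of 8 equal consecutive deltas.
def D_is_hallucinated_loop (onsets : List Int) : Prop :=
  10 ≤ onsets.length ∧ onsets.length ≤ 150 ∧
    hasRun8 (deltasOf onsets) ∧ ¬hasRun8 (deltasOf onsets).dropLast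
instance (onsets : List Int) : Decidable (D_is_hallucinated_loop onsets) := by
  unfold D_is_hallucinated_loop hasRun8; infer_instance

def Spec_is_hallucinated_loop (onsets : List Int) (out : Bool) : Prop :=
  ¬ D_is_hallucinated_loop onsets → out = is_hallucinated_loop_alt onsets
instance (onsets : List Int) (out : Bool) : Decidable (Spec_is_hallucinated_loop onsets out) := by
  unfold Spec_is_hallucinated_loop; infer_instance

def pvDiffWitness_is_hallucinated_loop : List Int := [0, 5, 6, 7, 8, 9, 10, 11, 12, 13]
def pvDiffWitnessOut_is_hallucinated_loop : Bool × Bool := (false, true)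

-- ===== CLAIM (what is proved, stated in full; the proofs are below) =====
def Claim_unchanged_is_hallucinated_loop : Prop := ∀ (onsets : List Int), Dom_is_hallucinated_loop onsets → Spec_is_hallucinated_loop onsets (is_hallucinated_loop onsets)
def Claim_changed_is_hallucinated_loop : Prop := Dom_is_hallucinated_loop (pvDiffWitness_is_hallucinated_loop) ∧ D_is_hallucinated_loop (pvDiffWitness_is_hallucinated_loop) ∧ is_hallucinated_loop (pvDiffWitness_is_hallucinated_loop) = pvDiffWitnessOut_is_hallucinated_loop.1 ∧ is_hallucinated_loop_alt (pvDiffWitness_is_hallucinated_loop) = pvDiffWitnessOut_is_hallucinated_loop.2 ∧ pvDiffWitnessOut_is_hallucinated_loop.1 ≠ pvDiffWitnessOut_is_hallucinated_loop.2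
def Claim_exact_is_hallucinated_loop : Prop := ∀ (onsets : List Int), Dom_is_hallucinated_loop onsets → D_is_hallucinated_loop onsets → is_hallucinated_loop onsets ≠ is_hallucinated_loop_alt onsets

-- ===== LEMMAS AND PROOFS =====

-- eqTake v k l : the first k elements of l exist and all equal v
def eqTake (v : Int) : Nat → List Int → Bool
  | 0, _ => true
  | _ + 1, [] => false
  | k + 1, x :: xs => x == v && eqTake v k xs

-- window8 l : some 8 consecutive elements of l are all equal
def window8 : List Int → Bool
  | [] => false
  | x :: xs => eqTake x 7 xs || window8 xs

-- winAt ys j : the 8 elements ys[j..j+7] exist and are all equal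
def winAt (ys : List Int) (j : Nat) : Bool := eqTake (ys.getD j 0) 8 (ys.drop j)

theorem eqTake_eq (v : Int) (l : List Int) : ∀ k : Nat,
    eqTake v k l = (decide (k ≤ l.length) && (l.take k).all (fun w => w == v)) := by
  induction l with
  | nil => intro k; cases k <;> simp [eqTake]
  | cons x xs ih =>
    intro k
    cases k with
    | zero => simp [eqTake]
    | succ k =>
      simp only [eqTake, List.take_succ_cons, List.all_cons, List.length_cons, ih k]
      cases hx : (x == v) <;> cases hk : decide (k + 1 ≤ xs.length + 1) <;>
        simp_all

theorem eqTake_mono (v : Int) (l : List Int) : ∀ {k k' : Nat}, k ≤ k' →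
    eqTake v k' l = true → eqTake v k l = true := by
  intro k k' hkk h
  rw [eqTake_eq] at h ⊢
  simp only [Bool.and_eq_true, decide_eq_true_eq] at h ⊢
  refine ⟨by omega, ?_⟩
  have := h.2
  rw [List.all_eq_true] at this ⊢
  intro w hw
  have hw' : w ∈ l.take k' := by
    have : l.take k = (l.take k').take k := by rw [List.take_take]; congr 1; omega
    rw [this] at hw
    exact List.take_subset _ _ hw
  exact this w hw'

theorem bScan_eq (l : List Int) : ∀ (prev : Int) (run : Nat), 1 ≤ run → run ≤ 7 →
    bScan prev run l = (eqTake prev (8 - run) l || window8 l) := by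
  induction l with
  | nil =>
    intro prev run h1 h7
    have : 8 - run = (7 - run) + 1 := by omega
    simp [bScan, eqTake, window8, this]
  | cons d rest ih =>
    intro prev run h1 h7
    have h8 : 8 - run = (7 - run) + 1 := by omega
    by_cases hd : d = prev
    · subst hd
      by_cases hr : run = 7
      · subst hr
        simp [bScan, eqTake, window8]
      · have hlt : run ≤ 6 := by omega
        have step : bScan d run (d :: rest) = bScan d (run + 1) rest := by
          simp [bScan]; omega
        rw [step, ih d (run + 1) (by omega) (by omega)]
        have h8' : 8 - (run + 1) = 7 - run := by omega
        rw [h8']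
        simp only [window8, eqTake, h8, BEq.rfl, Bool.true_and]
        have hm : eqTake d 7 rest = true → eqTake d (7 - run) rest = true :=
          eqTake_mono d rest (by omega)
        cases hA : eqTake d (7 - run) rest <;> cases hB : eqTake d 7 rest <;>
          simp_all
    · have hbe : (d == prev) = false := by simp [hd]
      have step : bScan prev run (d :: rest) = bScan d 1 rest := by
        simp [bScan, hbe]
      rw [step, ih d 1 (by omega) (by omega)]
      simp [window8, eqTake, h8, hbe]

theorem window8_iff (ys : List Int) :
    window8 ys = true ↔ ∃ j : Nat, winAt ys j = true := by
  induction ys with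
  | nil =>
    simp only [window8, winAt]
    constructor
    · intro h; cases h
    · rintro ⟨j, hj⟩
      simp [eqTake, List.drop_nil] at hj
  | cons x xs ih =>
    simp only [window8, Bool.or_eq_true, ih]
    constructor
    · rintro (h | ⟨j, hj⟩)
      · exact ⟨0, by simp [winAt, eqTake, h]⟩
      · exact ⟨j + 1, by simpa [winAt] using hj⟩
    · rintro ⟨j, hj⟩
      cases j with
      | zero =>
        left
        simp [winAt, eqTake] at hj
        exact hj
      | succ j =>
        right
        exact ⟨j, by simpa [winAt] using hj⟩

theorem winAt_true_length {ys : List Int} {j : Nat} (h : winAt ys j = true) :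
    j + 8 ≤ ys.length := by
  unfold winAt at h
  rw [eqTake_eq] at h
  simp only [Bool.and_eq_true, decide_eq_true_eq, List.length_drop] at h
  omega

theorem winAt_take (ys : List Int) (j m : Nat) (hm : j + 8 ≤ m) :
    winAt (ys.take m) j = winAt ys j := by
  unfold winAt
  have hg : (ys.take m).getD j 0 = ys.getD j 0 := by
    have : (ys.take m)[j]? = ys[j]? := by
      rw [List.getElem?_take_of_lt (by omega)]
    simp [List.getD, this]
  rw [hg, eqTake_eq, eqTake_eq]
  by_cases hlen : j + 8 ≤ ys.length
  · have h1 : 8 ≤ (ys.drop j).length := by simp; omega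
    have h2 : 8 ≤ ((ys.take m).drop j).length := by simp; omega
    have htk : ((ys.take m).drop j).take 8 = (ys.drop j).take 8 := by
      rw [List.drop_take, List.take_take]
      congr 1; omega
    rw [htk]
    have hA : 8 ≤ min m ys.length - j := by omega
    have hB : 8 ≤ ys.length - j := by omega
    simp [hA, hB]
  · have hA : ¬ 8 ≤ min m ys.length - j := by omega
    have hB : ¬ 8 ≤ ys.length - j := by omega
    simp [hA, hB]

theorem winAt_dropLast (ys : List Int) (j : Nat) :
    winAt ys.dropLast j = true ↔ (winAt ys j = true ∧ j + 8 < ys.length) := by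
  rw [List.dropLast_eq_take]
  constructor
  · intro h
    have hlen := winAt_true_length h
    simp only [List.length_take] at hlen
    have hb : j + 8 < ys.length := by omega
    exact ⟨by rw [← winAt_take ys j (ys.length - 1) (by omega)]; exact h, hb⟩
  · rintro ⟨h, hb⟩
    rw [winAt_take ys j (ys.length - 1) (by omega)]
    exact h

theorem window8_dropLast_imp (ys : List Int) :
    window8 ys.dropLast = true → window8 ys = true := by
  intro h
  rw [window8_iff] at h ⊢
  obtain ⟨j, hj⟩ := h
  exact ⟨j, ((winAt_dropLast ys j).mp hj).1⟩

theorem winAt_infix {ys : List Int} {j : Nat} (h : winAt ys j = true) :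
    ∃ a ∈ ys, List.replicate 8 a <:+: ys := by
  have hlen := winAt_true_length h
  unfold winAt at h
  rw [eqTake_eq] at h
  simp only [Bool.and_eq_true, decide_eq_true_eq, List.all_eq_true, beq_iff_eq] at h
  obtain ⟨-, hall⟩ := h
  have hrep : (ys.drop j).take 8 = List.replicate 8 (ys.getD j 0) := by
    rw [List.eq_replicate_iff]
    refine ⟨by simp; omega, fun b hb => hall b hb⟩
  have hinf : (ys.drop j).take 8 <:+: ys :=
    ((ys.drop j).take_prefix 8).isInfix.trans (ys.drop_suffix j).isInfix
  have hj : j < ys.length := by omega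
  refine ⟨ys.getD j 0, ?_, by rw [← hrep]; exact hinf⟩
  rw [List.getD_eq_getElem _ _ hj]
  exact List.getElem_mem _

theorem infix_winAt {ys : List Int} {a : Int} (h : List.replicate 8 a <:+: ys) :
    ∃ j, winAt ys j = true := by
  obtain ⟨s, t, hst⟩ := h
  refine ⟨s.length, ?_⟩
  subst hst
  have hdrop : (s ++ List.replicate 8 a ++ t).drop s.length = List.replicate 8 a ++ t := by
    rw [List.append_assoc, List.drop_left]
  have hget : (s ++ List.replicate 8 a ++ t).getD s.length 0 = a := by
    simp [List.getD]
  unfold winAt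
  rw [hget, hdrop, eqTake_eq]
  simp

theorem window8_eq_infix (l : List Int) :
    window8 l = true ↔ hasRun8 l := by
  rw [window8_iff]; unfold hasRun8
  constructor
  · rintro ⟨j, hj⟩; exact winAt_infix hj
  · rintro ⟨a, -, h⟩; exact infix_winAt h

-- the port's delta list is deltasOf
theorem deltas_port_eq (xs : List Int) :
    (PySem.List.pyRange 0 ((xs.length : Int) - 1) 1).map
      (fun j => PySem.List.pyGetD xs (j + 1) 0 - PySem.List.pyGetD xs j 0)
      = deltasOf xs := by
  apply List.ext_getElem
  · simp [deltasOf, PySem.List.length_pyRange_one]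
  · intro k h1 h2
    have hk : k < xs.length - 1 := by
      simp [PySem.List.length_pyRange_one] at h1; omega
    rw [List.getElem_map, PySem.List.getElem_pyRange_one]
    simp only [deltasOf, List.getElem_zipWith]
    have e1 : (0 : Int) + k + 1 = ((k + 1 : Nat) : Int) := by push_cast; ring
    have e0 : (0 : Int) + k = ((k : Nat) : Int) := by simp
    rw [e1, e0, PySem.List.pyGetD_natCast, PySem.List.pyGetD_natCast]
    have hk1 : k + 1 < xs.length := by omega
    have hkk : k < xs.length := by omega
    have hkt : k < xs.tail.length := by simp [List.length_tail]; omega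
    rw [List.getD_eq_getElem xs 0 hk1, List.getD_eq_getElem xs 0 hkk,
      List.getElem_tail]

-- A's per-window check equals winAt, for j in A's range
theorem check_eq_winAt (ds : List Int) (j : Int) (h0 : 0 ≤ j)
    (h8 : j + 8 ≤ (ds.length : Int)) :
    (let window := PySem.List.slice ds (some j) (some (j + 8))
     window.all (fun w => w == PySem.List.pyGetD window 0 0)) = winAt ds j.toNat := by
  have hsl : PySem.List.slice ds (some j) (some (j + 8)) = (ds.drop j.toNat).take 8 := by
    rw [PySem.List.slice_toNat ds h0 (by omega)]
    congr 1; omega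
  simp only [hsl]
  have hlen : 8 ≤ (ds.drop j.toNat).length := by simp; omega
  obtain ⟨x, xs, hxx⟩ : ∃ x xs, ds.drop j.toNat = x :: xs := by
    cases hc : ds.drop j.toNat with
    | nil => rw [hc] at hlen; simp at hlen
    | cons a as => exact ⟨a, as, rfl⟩
  have hget : ds.getD j.toNat 0 = x := by
    have hh := congrArg List.head? hxx
    rw [List.head?_drop] at hh
    simp [List.getD, hh]
  rw [hxx]
  unfold winAt
  rw [hxx, hget, eqTake_eq]
  have hxl : 7 ≤ xs.length := by
    have := hlen; rw [hxx] at this; simp at this; omega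
  simp only [List.take_succ_cons, List.all_cons, PySem.List.pyGetD_zero,
    List.getD_cons_zero, BEq.rfl, Bool.true_and, List.length_cons]
  have h78 : (8 : Nat) ≤ xs.length + 1 := by omega
  simp [h78]

-- A's window loop computes window8 of the deltas without the last one
theorem A_core (ds : List Int) (_h9 : 9 ≤ ds.length) :
    ((PySem.List.pyRange 0 ((ds.length : Int) - 8) 1).any (fun j =>
      let window := PySem.List.slice ds (some j) (some (j + 8))
      window.all (fun w => w == PySem.List.pyGetD window 0 0)))
    = window8 ds.dropLast := by
  apply Bool.coe_iff_coe.mp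
  rw [List.any_eq_true, window8_iff]
  constructor
  · rintro ⟨j, hjmem, hj⟩
    rw [PySem.List.mem_pyRange_one] at hjmem
    obtain ⟨hj0, hjlt⟩ := hjmem
    rw [check_eq_winAt _ j hj0 (by omega)] at hj
    refine ⟨j.toNat, (winAt_dropLast _ _).mpr ⟨hj, ?_⟩⟩
    have : (j.toNat : Int) = j := Int.toNat_of_nonneg hj0
    omega
  · rintro ⟨j, hj⟩
    rw [winAt_dropLast] at hj
    obtain ⟨hw, hlt⟩ := hj
    refine ⟨(j : Int), ?_, ?_⟩
    · rw [PySem.List.mem_pyRange_one]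
      constructor
      · positivity
      · omega
    · rw [check_eq_winAt _ (j : Int) (by positivity) (by omega)]
      simpa using hw

-- B's single pass computes window8 of the whole delta list
theorem B_core (ds : List Int) (h : ds ≠ []) :
    bScan (PySem.List.pyGetD ds 0 0) 1 (PySem.List.slice ds (some 1) none)
      = window8 ds := by
  obtain ⟨d0, dtail, rfl⟩ : ∃ d0 dtail, ds = d0 :: dtail := by
    cases ds with
    | nil => exact absurd rfl h
    | cons a as => exact ⟨a, as, rfl⟩
  rw [PySem.List.slice_from_one, List.tail_cons, PySem.List.pyGetD_zero,
    List.getD_cons_zero, bScan_eq dtail d0 1 (by omega) (by omega)]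
  rfl

theorem both_eval (onsets : List Int) (hg1 : ¬(onsets = [] ∨ onsets.length < 10))
    (hg2 : ¬(onsets.length > 150)) :
    is_hallucinated_loop onsets = window8 (deltasOf onsets).dropLast ∧
    is_hallucinated_loop_alt onsets = window8 (deltasOf onsets) := by
  have hn : 10 ≤ onsets.length := by
    rcases not_or.mp hg1 with ⟨-, h⟩; omega
  have hlen : (deltasOf onsets).length = onsets.length - 1 := by
    simp [deltasOf]
  constructor
  · unfold is_hallucinated_loop
    simp only [hg1, if_false, hg2]
    rw [deltas_port_eq]
    exact A_core _ (by omega)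
  · unfold is_hallucinated_loop_alt
    simp only [hg1, if_false, hg2]
    rw [deltas_port_eq]
    apply B_core
    intro hnil
    rw [hnil] at hlen
    simp at hlen
    omega

theorem is_hallucinated_loop_spec : Claim_unchanged_is_hallucinated_loop := by
  intro onsets _ hD
  by_cases hg1 : onsets = [] ∨ onsets.length < 10
  · unfold is_hallucinated_loop is_hallucinated_loop_alt
    simp only [hg1, if_true]
  · by_cases hg2 : onsets.length > 150
    · unfold is_hallucinated_loop is_hallucinated_loop_alt
      simp only [hg1, if_false, hg2, if_true]
    · obtain ⟨hA, hB⟩ := both_eval onsets hg1 hg2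
      rw [hA, hB]
      cases hfull : window8 (deltasOf onsets) with
      | false =>
        cases hdl : window8 (deltasOf onsets).dropLast with
        | false => rfl
        | true =>
          have := window8_dropLast_imp _ hdl
          rw [hfull] at this; cases this
      | true =>
        cases hdl : window8 (deltasOf onsets).dropLast with
        | false =>
          have hn : 10 ≤ onsets.length := by rcases not_or.mp hg1 with ⟨-, h⟩; omega
          refine absurd ⟨hn, by omega, (window8_eq_infix _).mp hfull, fun h => ?_⟩ hD
          rw [(window8_eq_infix _).mpr h] at hdl
          cases hdl
        | true => rfl

theorem is_hallucinated_loop_changed : Claim_changed_is_hallucinated_loop := by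
  unfold Claim_changed_is_hallucinated_loop; decide

theorem is_hallucinated_loop_tight : Claim_exact_is_hallucinated_loop := by
  intro onsets _ hD
  obtain ⟨hg1, hg2, hi, hni⟩ := hD
  obtain ⟨hA, hB⟩ := both_eval onsets (by rw [not_or]; exact ⟨by rintro rfl; simp at hg1, by omega⟩) (by omega)
  have hfull : window8 (deltasOf onsets) = true := (window8_eq_infix _).mpr hi
  have hdl : window8 (deltasOf onsets).dropLast = false := by
    cases h : window8 (deltasOf onsets).dropLast with
    | false => rfl
    | true => exact absurd ((window8_eq_infix _).mp h) hni
  rw [hA, hB, hfull, hdl]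
  decide
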